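-- pv_equiv track=rewrite | github.com/Hadi-Hajieghrary/Tether_Lift | Research/scripts/generate_figures.py | _find_contiguous
-- ===== SOURCE A (Python) =====
-- def _find_contiguous(indices):
--     """Find contiguous ranges in sorted index array."""
--     if len(indices) == 0:
--         return []
--     ranges = []
--     start = indices[0]
--     end = indices[0]
--     for idx in indices[1:]:
--         if idx == end + 1:
--             end = idx
--         else:
--             ranges.append((start, end))
--             start = idx
--             end = idx
--     ranges.append((start, end))
--     return ranges
-- ===== SOURCE B (Python) =====
-- def _find_contiguous(indices):
--     """Find contiguous ranges in sorted index array."""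
--     if not indices:
--         return []
--     n = len(indices)
--     breaks = [0] + [i for i in range(1, n) if indices[i] != indices[i - 1] + 1] + [n]
--     return [(indices[b], indices[nb - 1]) for b, nb in zip(breaks, breaks[1:])]
-- ===== Notes on version B (the rewrite author's own statement) =====
-- stated objective: alternative
-- what changed: Replaces A's running (start,end) accumulator loop with a two-phase boundary decomposition: first collect the break positions where indices[i] != indices[i-1]+1, then map consecutive boundary pairs to (first,last) tuples.
import Mathlib
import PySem

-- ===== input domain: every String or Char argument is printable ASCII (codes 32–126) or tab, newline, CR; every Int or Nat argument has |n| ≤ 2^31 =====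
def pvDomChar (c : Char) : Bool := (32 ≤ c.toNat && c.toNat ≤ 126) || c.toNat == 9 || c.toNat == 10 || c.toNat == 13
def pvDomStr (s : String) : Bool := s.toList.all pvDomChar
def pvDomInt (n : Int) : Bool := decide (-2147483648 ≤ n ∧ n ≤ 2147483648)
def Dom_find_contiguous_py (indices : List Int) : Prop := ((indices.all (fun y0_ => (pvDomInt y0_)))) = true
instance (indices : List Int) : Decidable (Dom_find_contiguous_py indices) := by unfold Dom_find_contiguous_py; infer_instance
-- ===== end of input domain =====

-- B replaces A's running (start,end) accumulator loop with a two-phase boundary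
-- decomposition (collect break positions, then map boundary pairs to tuples);
-- same O(n) cost, different structure; both total, equal on all inputs.

-- ===== PORT A =====
-- the loop body of A: state = (ranges, start, end)
def pvStepA (s : List (Int × Int) × Int × Int) (idx : Int) : List (Int × Int) × Int × Int :=
  if idx = s.2.2 + 1 then (s.1, s.2.1, idx)
  else (s.1 ++ [(s.2.1, s.2.2)], idx, idx)

def find_contiguous_py (indices : List Int) : List (Int × Int) :=
  match indices with
  | [] => []                       -- if len(indices) == 0: return []
  | i0 :: rest =>                  -- start = indices[0]; end = indices[0]; for idx in indices[1:]
    let st := rest.foldl pvStepA ([], i0, i0)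
    st.1 ++ [(st.2.1, st.2.2)]     -- ranges.append((start, end)); return ranges

-- ===== PORT B =====
-- the comprehension's condition: indices[i] != indices[i-1] + 1
-- (all indexing in Source B is at in-range non-negative positions, so List.getD is exact there)
def pvBreakP (xs : List Int) (i : Nat) : Bool := decide (xs.getD i 0 ≠ xs.getD (i - 1) 0 + 1)

-- [i for i in range(1, n) if indices[i] != indices[i-1] + 1]
def pvInterior (xs : List Int) : List Nat :=
  (List.range' 1 (xs.length - 1)).filter (pvBreakP xs)

def find_contiguous_py_alt (indices : List Int) : List (Int × Int) :=
  if indices = [] then []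
  else
    let breaks : List Nat := 0 :: pvInterior indices ++ [indices.length]
    -- [(indices[b], indices[nb-1]) for b, nb in zip(breaks, breaks[1:])]
    (breaks.zip breaks.tail).map (fun p => (indices.getD p.1 0, indices.getD (p.2 - 1) 0))

-- ===== PRECONDITION & SPEC =====
def Spec_find_contiguous_py (indices : List Int) (out : List (Int × Int)) : Prop := out = find_contiguous_py_alt indices
instance (indices : List Int) (out : List (Int × Int)) : Decidable (Spec_find_contiguous_py indices out) := by unfold Spec_find_contiguous_py; infer_instance

-- ===== CLAIM (what is proved, stated in full; the proofs are below) =====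
def Claim_equal_find_contiguous_py : Prop := ∀ (indices : List Int), Dom_find_contiguous_py indices → Spec_find_contiguous_py indices (find_contiguous_py indices)

-- ===== LEMMAS AND PROOFS =====

-- abstract recursion both ports are reduced to
def pvLoop (s e : Int) : List Int → List (Int × Int)
  | [] => [(s, e)]
  | i :: t => if i = e + 1 then pvLoop s i t else (s, e) :: pvLoop i i t

def pvSpec : List Int → List (Int × Int)
  | [] => []
  | x :: r => pvLoop x x r

-- overwrite the start of the first range
def pvSetFst (x : Int) : List (Int × Int) → List (Int × Int)
  | [] => []
  | p :: r => (x, p.2) :: r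

theorem pvLoop_setFst (l : List Int) : ∀ s e : Int, pvLoop s e l = pvSetFst s (pvLoop e e l) := by
  induction l with
  | nil => intro s e; rfl
  | cons i t ih =>
    intro s e
    by_cases h : i = e + 1
    · simp only [pvLoop, if_pos h]
      rw [ih s i, ih e i]
      cases pvLoop i i t <;> rfl
    · simp only [pvLoop, if_neg h]
      rfl

theorem pvFoldA (l : List Int) : ∀ (acc : List (Int × Int)) (s e : Int),
    (l.foldl pvStepA (acc, s, e)).1 ++ [((l.foldl pvStepA (acc, s, e)).2.1, (l.foldl pvStepA (acc, s, e)).2.2)]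
      = acc ++ pvLoop s e l := by
  induction l with
  | nil => intro acc s e; simp [pvLoop]
  | cons i t ih =>
    intro acc s e
    by_cases h : i = e + 1 <;> simp [pvStepA, h, pvLoop, ih]

theorem pvA_eq_spec (xs : List Int) : find_contiguous_py xs = pvSpec xs := by
  cases xs with
  | nil => rfl
  | cons x r =>
    have := pvFoldA r [] x x
    simpa [find_contiguous_py, pvSpec] using this

-- spec recurrence on two leading elements
theorem pvSpec_cons_cons (x y : Int) (t : List Int) :
    pvSpec (x :: y :: t) = if y = x + 1 then pvSetFst x (pvSpec (y :: t)) else (x, x) :: pvSpec (y :: t) := by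
  by_cases h : y = x + 1
  · subst h
    simp only [pvSpec, pvLoop, if_true]
    exact pvLoop_setFst t x (x + 1)
  · simp [pvSpec, pvLoop, h]

-- B viewed through named helpers
def pvG (xs : List Int) (p : Nat × Nat) : Int × Int := (xs.getD p.1 0, xs.getD (p.2 - 1) 0)

def pvBody (xs : List Int) : List Nat := pvInterior xs ++ [xs.length]

def pvOut (xs : List Int) : List (Int × Int) :=
  ((0 :: pvBody xs).zip (pvBody xs)).map (pvG xs)

theorem pvB_eq_out (xs : List Int) (h : xs ≠ []) : find_contiguous_py_alt xs = pvOut xs := by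
  simp only [find_contiguous_py_alt, if_neg h, pvOut, pvBody, List.cons_append, List.tail_cons]
  rfl

theorem pvInterior_ge_one (xs : List Int) : ∀ a ∈ pvInterior xs, 1 ≤ a := by
  intro a ha
  unfold pvInterior at ha
  exact (List.mem_range'_1.mp (List.mem_of_mem_filter ha)).1

theorem pvBody_ge_one (y : Int) (t : List Int) : ∀ a ∈ pvBody (y :: t), 1 ≤ a := by
  intro a ha
  rcases List.mem_append.mp ha with h | h
  · exact pvInterior_ge_one _ a h
  · simp at h; omega

-- shift lemma for the break positions
theorem pvInterior_cons (x y : Int) (t : List Int) :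
    pvInterior (x :: y :: t)
      = (if y ≠ x + 1 then [1] else []) ++ (pvInterior (y :: t)).map (· + 1) := by
  have hr : List.range' 1 ((x :: y :: t).length - 1) = 1 :: (List.range' 1 ((y :: t).length - 1)).map (· + 1) := by
    simp only [List.length_cons, Nat.add_sub_cancel]
    rw [List.range'_succ]
    congr 1
    rw [← List.map_add_range']
    exact (List.map_congr_left (fun a _ => Nat.add_comm a 1)).symm
  have hfc : List.filter (pvBreakP (x :: y :: t) ∘ (· + 1)) (List.range' 1 ((y :: t).length - 1))
      = List.filter (pvBreakP (y :: t)) (List.range' 1 ((y :: t).length - 1)) := by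
    apply List.filter_congr
    intro i hi
    have h1 : 1 ≤ i := (List.mem_range'_1.mp hi).1
    obtain ⟨j, rfl⟩ : ∃ j, i = j + 1 := ⟨i - 1, (Nat.sub_add_cancel h1).symm⟩
    simp [pvBreakP, Function.comp, List.getD]
  unfold pvInterior
  rw [hr, List.filter_cons, List.filter_map, hfc]
  by_cases h : y = x + 1 <;> simp [pvBreakP, h, List.getD]

-- the position-shift step for the pair map
theorem pvShift (x : Int) (tl : List Int) (a : Nat) (L M : List Nat) (hM : ∀ b ∈ M, 1 ≤ b) :
    (((a + 1) :: L.map (· + 1)).zip (M.map (· + 1))).map (pvG (x :: tl))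
      = ((a :: L).zip M).map (pvG tl) := by
  have hc : ((a + 1) :: L.map (· + 1)) = (a :: L).map (· + 1) := rfl
  rw [hc, List.zip_map, List.map_map]
  apply List.map_congr_left
  intro p hp
  have h1 : 1 ≤ p.2 := hM _ (List.of_mem_zip hp).2
  obtain ⟨m, hm⟩ : ∃ m, p.2 = m + 1 := ⟨p.2 - 1, (Nat.sub_add_cancel h1).symm⟩
  simp [pvG, Prod.map, hm, List.getD]

-- B satisfies the same two-leading-element recurrence
theorem pvOut_cons_cons (x y : Int) (t : List Int) :
    pvOut (x :: y :: t) = if y = x + 1 then pvSetFst x (pvOut (y :: t)) else (x, x) :: pvOut (y :: t) := by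
  by_cases h : y = x + 1
  · rw [if_pos h]
    have hI : pvInterior (x :: y :: t) = (pvInterior (y :: t)).map (· + 1) := by
      rw [pvInterior_cons]; simp [h]
    have hbody : pvBody (x :: y :: t) = (pvBody (y :: t)).map (· + 1) := by
      simp [pvBody, hI]
    cases hT : pvBody (y :: t) with
    | nil => simp [pvBody] at hT
    | cons c M =>
      have hc : 1 ≤ c := pvBody_ge_one y t c (by rw [hT]; exact List.mem_cons_self ..)
      have hM' : ∀ b ∈ M, 1 ≤ b := fun b hb => pvBody_ge_one y t b (by rw [hT]; exact List.mem_cons_of_mem _ hb)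
      obtain ⟨c', rfl⟩ : ∃ c', c = c' + 1 := ⟨c - 1, (Nat.sub_add_cancel hc).symm⟩
      simp only [pvOut, hbody, hT, List.map_cons, List.zip_cons_cons]
      rw [pvShift x (y :: t) (c' + 1) M M hM']
      simp [pvG, pvSetFst, List.getD]
  · rw [if_neg h]
    have hI : pvInterior (x :: y :: t) = 1 :: (pvInterior (y :: t)).map (· + 1) := by
      rw [pvInterior_cons]; simp [h]
    have hbody : pvBody (x :: y :: t) = 1 :: (pvBody (y :: t)).map (· + 1) := by
      simp [pvBody, hI]
    have hsh := pvShift x (y :: t) 0 (pvBody (y :: t)) (pvBody (y :: t)) (pvBody_ge_one y t)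
    rw [Nat.zero_add] at hsh
    simp only [pvOut, hbody, List.zip_cons_cons, List.map_cons]
    rw [hsh]
    simp [pvG, List.getD]

theorem pvB_eq_spec (xs : List Int) : find_contiguous_py_alt xs = pvSpec xs := by
  induction xs with
  | nil => rfl
  | cons x tl ih =>
    cases tl with
    | nil =>
      simp [find_contiguous_py_alt, pvInterior, pvSpec, pvLoop, List.getD]
    | cons y t =>
      rw [pvB_eq_out _ (by simp), pvOut_cons_cons, pvSpec_cons_cons,
          ← pvB_eq_out _ (by simp : (y :: t) ≠ []), ih]

-- ===== VERDICT (by name: the statement is the Claim_ definition above) =====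
theorem find_contiguous_py_spec : Claim_equal_find_contiguous_py := by
  intro indices _
  unfold Spec_find_contiguous_py
  rw [pvA_eq_spec, pvB_eq_spec]
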